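-- pv_equiv track=rewrite | github.com/rajat19/foobar | _includes/lovely-lucky-lambs/solution.py | generous
-- ===== SOURCE A (Python) =====
-- def generous(total_lambs):
-- 	generousList = []
-- 	x, total = 0, 0
-- 	while x <= total_lambs:
-- 		current = 2**x
-- 		generousList.append(current)
-- 		total += current
-- 		if total > total_lambs:
-- 			break
-- 		x += 1
-- 	return len(generousList)
-- ===== SOURCE B (Python) =====
-- def generous(total_lambs):
--     if total_lambs < 0:
--         return 0
--     return (total_lambs + 1).bit_length()
-- ===== Notes on version B (the rewrite author's own statement) =====
-- stated objective: simpler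
-- what changed: Replaces the list-building accumulation loop over powers of two with a closed-form bit-length computation (guarded for negative input).
import Mathlib
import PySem

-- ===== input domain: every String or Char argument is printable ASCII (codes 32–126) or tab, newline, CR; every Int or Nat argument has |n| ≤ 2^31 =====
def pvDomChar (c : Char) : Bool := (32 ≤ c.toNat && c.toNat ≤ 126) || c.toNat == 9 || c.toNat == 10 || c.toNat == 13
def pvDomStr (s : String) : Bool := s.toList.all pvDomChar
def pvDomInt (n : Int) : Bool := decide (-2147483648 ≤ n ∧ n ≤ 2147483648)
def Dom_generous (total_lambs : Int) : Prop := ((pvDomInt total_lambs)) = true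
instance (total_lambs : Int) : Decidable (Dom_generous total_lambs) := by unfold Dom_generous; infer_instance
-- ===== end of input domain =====

-- B replaces A's accumulation loop by the closed form bit_length(total_lambs+1); simpler, no loop.

-- ===== PORT A =====
-- the while loop: state (x, total, list length); 2**x ported as 2^x.toNat (x stays ≥ 0 in the loop)
def generousAux (total_lambs x total count : Int) : Int :=
  if h : x ≤ total_lambs then
    let current := (2 : Int) ^ x.toNat
    let total' := total + current
    if total' > total_lambs then count + 1
    else generousAux total_lambs (x + 1) total' (count + 1)
  else count
termination_by (total_lambs - total).toNat
decreasing_by have := pow_pos (show (0:Int) < 2 by norm_num) x.toNat; omega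

def generous (total_lambs : Int) : Int := generousAux total_lambs 0 0 0

-- ===== PORT B =====
-- (total_lambs + 1).bit_length() for a positive argument is Nat.size
def generous_alt (total_lambs : Int) : Int :=
  if total_lambs < 0 then 0 else ((total_lambs + 1).toNat.size : Int)

-- ===== PRECONDITION & SPEC =====
def Spec_generous (total_lambs : Int) (out : Int) : Prop := out = generous_alt total_lambs
instance (total_lambs : Int) (out : Int) : Decidable (Spec_generous total_lambs out) := by unfold Spec_generous; infer_instance

-- ===== CLAIM (what is proved, stated in full; the proofs are below) =====
def Claim_equal_generous : Prop := ∀ (total_lambs : Int), Dom_generous total_lambs → Spec_generous total_lambs (generous total_lambs)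

-- ===== LEMMAS AND PROOFS =====

-- loop invariant: entering with x = k, total = 2^k - 1, count = k (and 2^k - 1 ≤ T) yields size (T+1)
theorem generousAux_eq (T : Int) (hT : 0 ≤ T) :
    ∀ (m k : Nat), (T + 1).toNat - 2 ^ k ≤ m → (2 : Int) ^ k - 1 ≤ T →
      generousAux T (k : Int) ((2 : Int) ^ k - 1) (k : Int) = (((T + 1).toNat.size : Nat) : Int) := by
  intro m
  induction m with
  | zero =>
    intro k hm hk
    -- 2^k ≥ T+1, so the loop breaks immediately: result k+1 = size (T+1)
    have hkT : (k : Int) ≤ T := by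
      have : (k : Int) < 2 ^ k := by exact_mod_cast Nat.lt_two_pow_self
      omega
    have h2 : (T + 1).toNat ≤ 2 ^ k := by omega
    rw [generousAux.eq_def]
    simp only [hkT, dif_pos]
    have hbreak : (2 : Int) ^ k - 1 + 2 ^ ((k : Int)).toNat > T := by
      have : ((k : Int)).toNat = k := by simp
      rw [this]
      have h2' : ((T + 1).toNat : Int) ≤ 2 ^ k := by exact_mod_cast h2
      have : ((T + 1).toNat : Int) = T + 1 := by omega
      omega
    rw [if_pos hbreak]
    have hsz : (T + 1).toNat.size = k + 1 := by
      apply Nat.le_antisymm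
      · exact Nat.size_le.mpr (by
          have : (T + 1).toNat < 2 ^ (k + 1) := by
            have := Nat.pow_lt_pow_succ (a := 2) (n := k) (by omega)
            omega
          exact this)
      · apply Nat.lt_size.mpr
        have hk' : (2 : Int) ^ k ≤ T + 1 := by omega
        have h2' : ((T + 1).toNat : Int) = T + 1 := by omega
        have : ((2 ^ k : Nat) : Int) ≤ ((T + 1).toNat : Int) := by push_cast; omega
        exact_mod_cast this
    rw [hsz]; push_cast; ring
  | succ m ih =>
    intro k hm hk
    rw [generousAux.eq_def]
    have hkT : (k : Int) ≤ T := by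
      have : (k : Int) < 2 ^ k := by exact_mod_cast Nat.lt_two_pow_self
      omega
    simp only [hkT, dif_pos]
    have hxt : ((k : Int)).toNat = k := by simp
    by_cases hbr : (2 : Int) ^ k - 1 + 2 ^ ((k : Int)).toNat > T
    · rw [if_pos hbr]
      rw [hxt] at hbr
      have hsz : (T + 1).toNat.size = k + 1 := by
        apply Nat.le_antisymm
        · apply Nat.size_le.mpr
          have : T + 1 < 2 ^ (k + 1) := by
            have : (2:Int) ^ (k+1) = 2 ^ k + 2 ^ k := by ring
            omega
          have h2 : ((T + 1).toNat : Int) = T + 1 := by omega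
          have : ((T + 1).toNat : Int) < ((2 ^ (k+1) : Nat) : Int) := by push_cast; omega
          exact_mod_cast this
        · apply Nat.lt_size.mpr
          have h2 : ((T + 1).toNat : Int) = T + 1 := by omega
          have : ((2 ^ k : Nat) : Int) ≤ ((T + 1).toNat : Int) := by push_cast; omega
          exact_mod_cast this
      rw [hsz]; push_cast; ring
    · rw [if_neg hbr, hxt]
      rw [hxt] at hbr
      push Not at hbr
      have heq : (2 : Int) ^ k - 1 + 2 ^ k = 2 ^ (k + 1) - 1 := by ring
      have := ih (k + 1) (by
          have : 2 ^ k < 2 ^ (k + 1) := Nat.pow_lt_pow_succ (by omega)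
          omega)
        (by rw [pow_succ]; omega)
      rw [heq]
      have hcast : ((k : Int) + 1) = ((k + 1 : Nat) : Int) := by push_cast; ring
      rw [hcast]
      exact this

theorem generous_spec : Claim_equal_generous := by
  intro T _
  unfold Spec_generous generous generous_alt
  by_cases hT : T < 0
  · rw [if_pos hT, generousAux.eq_def]
    have : ¬ (0 : Int) ≤ T := by omega
    simp [this]
  · rw [if_neg hT]
    push Not at hT
    have h := generousAux_eq T hT ((T + 1).toNat) 0 (by simp) (by norm_num; omega)
    simpa using h
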